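-- pv_equiv track=rewrite | github.com/richard-fty/apex-agent | agent/context/strategies.py | _split_system_and_rounds
-- ===== SOURCE A (Python) =====
-- from typing import Any
--
-- def _split_system_and_rounds(
--     messages: list[dict[str, Any]],
-- ) -> tuple[list[dict[str, Any]], list[list[dict[str, Any]]]]:
--     """Split messages into system messages and conversation rounds.
--
--     A round starts with each user message and includes all subsequent
--     assistant + tool messages until the next user message.
--     """
--     system_msgs = [m for m in messages if m.get("role") == "system"]
--     non_system = [m for m in messages if m.get("role") != "system"]
--
--     rounds: list[list[dict[str, Any]]] = []
--     current_round: list[dict[str, Any]] = []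
--
--     for msg in non_system:
--         if msg.get("role") == "user" and current_round:
--             rounds.append(current_round)
--             current_round = []
--         current_round.append(msg)
--
--     if current_round:
--         rounds.append(current_round)
--
--     return system_msgs, rounds
-- ===== SOURCE B (Python) =====
-- def _split_system_and_rounds(messages):
--     system_msgs = [m for m in messages if m.get("role") == "system"]
--     non_system = [m for m in messages if m.get("role") != "system"]
--
--     def rounds_of(msgs):
--         # each round: head message plus everything up to the next user message
--         if not msgs:
--             return []
--         i = 1
--         while i < len(msgs) and msgs[i].get("role") != "user":
--             i += 1
--         return [msgs[:i]] + rounds_of(msgs[i:])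
--
--     return system_msgs, rounds_of(non_system)
-- ===== Notes on version B (the rewrite author's own statement) =====
-- stated objective: alternative
-- what changed: Replaces A's running-accumulator fold (current_round with flush-on-user) by a recursive decomposition that slices each round off the front: a round is the head message plus messages up to the next user message.
import Mathlib
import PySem

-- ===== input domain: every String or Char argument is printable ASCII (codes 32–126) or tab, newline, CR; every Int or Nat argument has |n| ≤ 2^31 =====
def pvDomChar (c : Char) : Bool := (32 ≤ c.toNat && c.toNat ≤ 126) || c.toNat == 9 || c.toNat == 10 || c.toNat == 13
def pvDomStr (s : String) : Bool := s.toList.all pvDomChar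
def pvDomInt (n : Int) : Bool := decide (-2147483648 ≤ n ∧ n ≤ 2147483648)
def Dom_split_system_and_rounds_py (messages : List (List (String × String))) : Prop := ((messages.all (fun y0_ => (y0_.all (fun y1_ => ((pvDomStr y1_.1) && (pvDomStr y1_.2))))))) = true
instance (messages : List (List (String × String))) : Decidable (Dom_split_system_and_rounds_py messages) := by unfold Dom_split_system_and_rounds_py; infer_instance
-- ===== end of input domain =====

-- B replaces A's running-accumulator fold by a recursive front-slicing decomposition of the rounds (alternative, same cost).


-- m.get("role") == "system" / == "user" (a dict is an association list; get = first match)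
def pvIsSys (m : List (String × String)) : Bool := (PySem.Dict.mk m).get? "role" == some "system"
def pvIsUser (m : List (String × String)) : Bool := (PySem.Dict.mk m).get? "role" == some "user"

-- ===== PORT A =====
-- one iteration of A's loop: flush current_round on a user message, then append msg
def pvStepA (st : List (List (List (String × String))) × List (List (String × String)))
    (msg : List (String × String)) :
    List (List (List (String × String))) × List (List (String × String)) :=
  let st := if pvIsUser msg && !st.2.isEmpty then (st.1 ++ [st.2], []) else st
  (st.1, st.2 ++ [msg])

def split_system_and_rounds_py (messages : List (List (String × String))) : (List (List (String × String))) × (List (List (List (String × String)))) :=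
  let system_msgs := messages.filter (fun m => pvIsSys m)
  let non_system := messages.filter (fun m => !pvIsSys m)
  let p := non_system.foldl pvStepA ([], [])
  let rounds := if p.2.isEmpty then p.1 else p.1 ++ [p.2]
  (system_msgs, rounds)

-- ===== PORT B =====
-- the while loop of Source B: first index j ≥ i with msgs[j] a user message (or len(msgs))
def pvNextUser (msgs : List (List (String × String))) (i : Nat) : Nat :=
  if h : i < msgs.length then
    if pvIsUser msgs[i] then i else pvNextUser msgs (i + 1)
  else i
termination_by msgs.length - i

-- cited by pvRoundsOf's decreasing_by
theorem pvNextUser_ge (msgs : List (List (String × String))) (i : Nat) : i ≤ pvNextUser msgs i := by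
  unfold pvNextUser
  split
  · split
    · exact le_refl _
    · exact le_trans (Nat.le_succ i) (pvNextUser_ge msgs (i + 1))
  · exact le_refl _
termination_by msgs.length - i

-- Source B's rounds_of; msgs[:i] and msgs[i:] with 0 ≤ i ≤ len(msgs) are exactly List.take i / List.drop i
def pvRoundsOf (msgs : List (List (String × String))) : List (List (List (String × String))) :=
  match msgs with
  | [] => []
  | m :: t =>
    let i := pvNextUser (m :: t) 1
    (m :: t).take i :: pvRoundsOf ((m :: t).drop i)
termination_by msgs.length
decreasing_by
  have h1 : 1 ≤ pvNextUser (m :: t) 1 := pvNextUser_ge (m :: t) 1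
  simp only [List.length_drop]
  simp only [List.length_cons]
  omega

def split_system_and_rounds_py_alt (messages : List (List (String × String))) : (List (List (String × String))) × (List (List (List (String × String)))) :=
  let system_msgs := messages.filter (fun m => pvIsSys m)
  let non_system := messages.filter (fun m => !pvIsSys m)
  (system_msgs, pvRoundsOf non_system)

-- ===== PRECONDITION & SPEC =====
def Spec_split_system_and_rounds_py (messages : List (List (String × String))) (out : (List (List (String × String))) × (List (List (List (String × String))))) : Prop := out = split_system_and_rounds_py_alt messages
instance (messages : List (List (String × String))) (out : (List (List (String × String))) × (List (List (List (String × String))))) : Decidable (Spec_split_system_and_rounds_py messages out) := by unfold Spec_split_system_and_rounds_py; infer_instance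

-- ===== CLAIM (what is proved, stated in full; the proofs are below) =====
def Claim_equal_split_system_and_rounds_py : Prop := ∀ (messages : List (List (String × String))), Dom_split_system_and_rounds_py messages → Spec_split_system_and_rounds_py messages (split_system_and_rounds_py messages)

-- ===== LEMMAS AND PROOFS =====

-- finalize A's fold state: flush the last current_round if nonempty
def pvFin (p : List (List (List (String × String))) × List (List (String × String))) : List (List (List (String × String))) :=
  if p.2.isEmpty then p.1 else p.1 ++ [p.2]

theorem pvFoldA_shape (l : List (List (String × String)))
    (r : List (List (List (String × String)))) (c : List (List (String × String))) :
    l.foldl pvStepA (r, c) = (r ++ (l.foldl pvStepA ([], c)).1, (l.foldl pvStepA ([], c)).2) := by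
  induction l generalizing r c with
  | nil => simp
  | cons m t ih =>
    simp only [List.foldl_cons]
    by_cases hu : (pvIsUser m && !c.isEmpty) = true
    · simp only [pvStepA, hu, if_pos, List.nil_append]
      rw [ih (r ++ [c]) [m], ih [c] [m]]
      simp
    · simp only [pvStepA, hu, if_neg, Bool.false_eq_true, not_false_iff]
      exact ih r (c ++ [m])

theorem pv_take_len_takeWhile (p : List (String × String) → Bool) (t : List (List (String × String))) :
    t.take (t.takeWhile p).length = t.takeWhile p := by
  induction t with
  | nil => simp
  | cons a t ih =>
    by_cases hp : p a = true <;> simp [hp, ih]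

theorem pv_drop_len_takeWhile (p : List (String × String) → Bool) (t : List (List (String × String))) :
    t.drop (t.takeWhile p).length = t.dropWhile p := by
  induction t with
  | nil => simp
  | cons a t ih =>
    by_cases hp : p a = true <;> simp [hp, ih]

-- pvNextUser counts the non-user prefix starting at i
theorem pvNextUser_eq (msgs : List (List (String × String))) (i : Nat) :
    pvNextUser msgs i = i + ((msgs.drop i).takeWhile (fun m => !pvIsUser m)).length := by
  unfold pvNextUser
  split
  · rename_i h
    rw [List.drop_eq_getElem_cons h]
    split
    · rename_i hu; simp [hu]
    · rename_i hu
      simp only [Bool.not_eq_true] at hu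
      rw [pvNextUser_eq msgs (i + 1)]
      simp only [List.takeWhile_cons, hu, Bool.not_false, if_pos, List.length_cons]
      omega
  · rename_i h
    have hd : msgs.drop i = [] := List.drop_eq_nil_of_le (by omega)
    simp [hd]
termination_by msgs.length - i

-- unfolding of B's recursion on a nonempty list
theorem pvRoundsOf_cons (m : List (String × String)) (t : List (List (String × String))) :
    pvRoundsOf (m :: t)
      = (m :: t.takeWhile (fun m => !pvIsUser m)) :: pvRoundsOf (t.dropWhile (fun m => !pvIsUser m)) := by
  conv_lhs => rw [pvRoundsOf]
  have hnu : pvNextUser (m :: t) 1 = 1 + (t.takeWhile (fun m => !pvIsUser m)).length := by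
    rw [pvNextUser_eq]; simp
  simp only [hnu]
  rw [Nat.add_comm, List.take_succ_cons, pv_take_len_takeWhile,
    List.drop_succ_cons, pv_drop_len_takeWhile]

-- main invariant: A's fold with a nonempty current round equals B's recursion continued
theorem pvMain (l : List (List (String × String))) (c : List (List (String × String))) (hc : c ≠ []) :
    pvFin (l.foldl pvStepA ([], c))
      = (c ++ l.takeWhile (fun m => !pvIsUser m)) :: pvRoundsOf (l.dropWhile (fun m => !pvIsUser m)) := by
  induction l generalizing c with
  | nil => simp [pvFin, pvRoundsOf, hc]
  | cons m t ih =>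
    by_cases hu : pvIsUser m = true
    · have hstep : pvStepA ([], c) m = ([c], [m]) := by
        simp [pvStepA, hu, hc]
      simp only [List.foldl_cons, hstep]
      rw [pvFoldA_shape t [c] [m]]
      have hfin : pvFin ([c] ++ (t.foldl pvStepA ([], [m])).1, (t.foldl pvStepA ([], [m])).2)
          = [c] ++ pvFin (t.foldl pvStepA ([], [m])) := by
        unfold pvFin; split <;> simp_all
      rw [hfin, ih [m] (by simp)]
      simp [hu, pvRoundsOf_cons]
    · simp only [Bool.not_eq_true] at hu
      have hstep : pvStepA ([], c) m = ([], c ++ [m]) := by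
        simp [pvStepA, hu]
      simp only [List.foldl_cons, hstep]
      rw [ih (c ++ [m]) (by simp)]
      simp [hu]

theorem pvRounds_eq (l : List (List (String × String))) :
    pvFin (l.foldl pvStepA ([], [])) = pvRoundsOf l := by
  cases l with
  | nil => simp [pvFin, pvRoundsOf]
  | cons m t =>
    have hstep : pvStepA ([], []) m = ([], [m]) := by simp [pvStepA]
    simp only [List.foldl_cons, hstep]
    rw [pvMain t [m] (by simp), pvRoundsOf_cons]
    simp

-- ===== VERDICT (by name: the statement is the Claim_ definition above) =====
theorem split_system_and_rounds_py_spec : Claim_equal_split_system_and_rounds_py := by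
  intro messages _
  unfold Spec_split_system_and_rounds_py split_system_and_rounds_py split_system_and_rounds_py_alt
  exact congrArg _ (pvRounds_eq _)
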